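-- pv_equiv track=rewrite | github.com/SamuelAsmare/Leetcode | 767-prime-number-of-set-bits-in-binary-representation/prime-number-of-set-bits-in-binary-representation.py | prime_set
-- ===== SOURCE A (Python) =====
-- def prime_set(num):
--     primes = {2,3,5,7,11,13,17,19}
--     set_bits = 0
--     while num > 0:
--         if num & 1:
--             set_bits += 1
--         num >>= 1
--     return set_bits in primes
-- ===== SOURCE B (Python) =====
-- def prime_set(num):
--     def bits(n):
--         return [] if n <= 0 else [n % 2] + bits(n // 2)
--     return sum(bits(num)) in (2, 3, 5, 7, 11, 13, 17, 19)
-- ===== Notes on version B (the rewrite author's own statement) =====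
-- stated objective: alternative
-- what changed: Replaced the imperative shift-and-test accumulator loop with a recursive decomposition: build the list of binary digits by repeated divmod, sum it, and test the sum for membership in the prime tuple.
import Mathlib
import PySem

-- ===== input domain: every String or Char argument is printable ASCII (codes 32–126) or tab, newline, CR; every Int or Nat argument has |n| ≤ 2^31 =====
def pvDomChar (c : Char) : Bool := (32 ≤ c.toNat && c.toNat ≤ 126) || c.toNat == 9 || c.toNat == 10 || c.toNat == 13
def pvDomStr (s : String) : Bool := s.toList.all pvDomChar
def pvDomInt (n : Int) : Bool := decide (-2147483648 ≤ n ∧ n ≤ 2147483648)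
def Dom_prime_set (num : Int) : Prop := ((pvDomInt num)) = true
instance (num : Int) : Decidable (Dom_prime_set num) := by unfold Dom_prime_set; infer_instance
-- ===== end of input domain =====

-- B replaces A's imperative shift-and-test accumulator loop with a recursive
-- decomposition: build the binary digit list by repeated divmod, sum it, test membership.

-- termination helper for port A's loop: `num >> 1` shrinks a positive int
theorem pvShift1_toNat_lt (num : Int) (h : 0 < num) : (num >>> (1:Int)).toNat < num.toNat := by
  obtain ⟨n, rfl⟩ : ∃ n : Nat, num = (n : Int) := ⟨num.toNat, (Int.toNat_of_nonneg h.le).symm⟩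
  rw [show ((n : Int) >>> (1:Int)) = ((n >>> 1 : Nat) : Int) from (Int.natCast_shiftRight n 1).symm]
  simp only [Int.toNat_natCast, Nat.shiftRight_one]
  omega

-- termination helper for port B's recursion: `n // 2` shrinks a positive int
theorem pvHalf_toNat_lt (n : Int) (h : ¬ n ≤ 0) : (PySem.Int.floordiv n 2).toNat < n.toNat := by
  have h2 : PySem.Int.floordiv n 2 = n / 2 := PySem.Int.floordiv_eq_ediv_of_pos (by omega)
  rw [h2]; omega

-- ===== PORT A =====
-- A's loop: test the low bit, then shift right, once per binary digit
def pvLoopA (num set_bits : Int) : Int :=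
  if num > 0 then
    pvLoopA (num >>> (1:Int)) (if Int.land num 1 ≠ 0 then set_bits + 1 else set_bits)
  else set_bits
termination_by num.toNat
decreasing_by exact pvShift1_toNat_lt num (by omega)

def prime_set (num : Int) : Bool :=
  ([2, 3, 5, 7, 11, 13, 17, 19] : List Int).contains (pvLoopA num 0)

-- ===== PORT B =====
-- B's helper `bits`: the list of binary digits of n, least-significant first
def pvBits (n : Int) : List Int :=
  if n ≤ 0 then [] else PySem.Int.mod n 2 :: pvBits (PySem.Int.floordiv n 2)
termination_by n.toNat
decreasing_by exact pvHalf_toNat_lt n (by omega)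

def prime_set_alt (num : Int) : Bool :=
  ([2, 3, 5, 7, 11, 13, 17, 19] : List Int).contains (pvBits num).sum

-- ===== PRECONDITION & SPEC =====
def Spec_prime_set (num : Int) (out : Bool) : Prop := out = prime_set_alt num
instance (num : Int) (out : Bool) : Decidable (Spec_prime_set num out) := by unfold Spec_prime_set; infer_instance

-- ===== CLAIM =====
def Claim_equal_prime_set : Prop := ∀ (num : Int), Dom_prime_set num → Spec_prime_set num (prime_set num)

-- ===== LEMMAS AND PROOFS =====

theorem pvLoopA_eq (num sb : Int) :
    pvLoopA num sb =
      if num > 0 then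
        pvLoopA (num >>> (1:Int)) (if Int.land num 1 ≠ 0 then sb + 1 else sb)
      else sb := by
  conv_lhs => rw [pvLoopA]

theorem pvBits_eq (n : Int) :
    pvBits n = if n ≤ 0 then [] else PySem.Int.mod n 2 :: pvBits (PySem.Int.floordiv n 2) := by
  conv_lhs => rw [pvBits]

-- A's loop equals the accumulator plus the sum of B's digit list
theorem pvLoopA_eq_sum (n : Nat) (sb : Int) :
    pvLoopA (n : Int) sb = sb + (pvBits (n : Int)).sum := by
  induction n using Nat.strong_induction_on generalizing sb with
  | _ n ih =>
    rcases Nat.eq_zero_or_pos n with rfl | hn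
    · rw [pvLoopA_eq, pvBits_eq]; simp
    · have hpos : (0:Int) < (n : Int) := by exact_mod_cast hn
      have hshift : ((n : Int) >>> (1:Int)) = ((n / 2 : Nat) : Int) := by
        rw [show ((n : Int) >>> (1:Int)) = ((n >>> 1 : Nat) : Int) from (Int.natCast_shiftRight n 1).symm,
          Nat.shiftRight_one]
      have hdiv : PySem.Int.floordiv (n : Int) 2 = ((n / 2 : Nat) : Int) := by
        exact_mod_cast PySem.Int.floordiv_natCast n 2
      have hmod : PySem.Int.mod (n : Int) 2 = ((n % 2 : Nat) : Int) := by
        exact_mod_cast PySem.Int.mod_natCast n 2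
      have hland : Int.land (n : Int) 1 = ((n &&& 1 : Nat) : Int) := rfl
      rw [pvLoopA_eq, if_pos hpos, hshift, ih (n / 2) (by omega)]
      conv_rhs => rw [pvBits_eq]
      rw [if_neg (show ¬((n : Int) ≤ 0) by omega), hdiv, hmod, hland,
        Nat.and_one_is_mod, List.sum_cons]
      rcases Nat.even_or_odd n with he | ho
      · have h2 : n % 2 = 0 := Nat.even_iff.mp he
        rw [h2, if_neg (by norm_num)]
        push_cast [h2]; ring
      · have h2 : n % 2 = 1 := Nat.odd_iff.mp ho
        rw [h2, if_pos (by norm_num)]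
        push_cast [h2]; ring

-- ===== VERDICT =====
theorem prime_set_spec : Claim_equal_prime_set := by
  intro num _
  unfold Spec_prime_set prime_set prime_set_alt
  by_cases h : 0 < num
  · obtain ⟨n, rfl⟩ : ∃ n : Nat, num = (n : Int) := ⟨num.toNat, (Int.toNat_of_nonneg h.le).symm⟩
    rw [pvLoopA_eq_sum, zero_add]
  · rw [pvLoopA_eq, if_neg h, pvBits_eq, if_pos (by omega)]
    decide
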